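-- pv_equiv track=rewrite | github.com/jackeyGao/j2a | server.py | content_process
-- ===== SOURCE A (Python) =====
-- def content_process(output):
--     if not output.startswith('<?xml'):
--         return output
--
--     for line in output.split('\n'):
--         if not line.startswith('<span'):
--             continue
--
--         if not line.endswith('</pre>'):
--             continue
--
--         return line.replace('</pre>', '')
--
--     return output
-- ===== SOURCE B (Python) =====
-- import re
--
-- _PAT = re.compile(r'^<span.*</pre>$', re.MULTILINE)
--
-- def content_process(output):
--     if not output.startswith('<?xml'):
--         return output
--     m = _PAT.search(output)
--     if m is None:
--         return output
--     return m.group().replace('</pre>', '')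
-- ===== Notes on version B (the rewrite author's own statement) =====
-- stated objective: idiomatic
-- what changed: Replaced the explicit split-into-lines loop with continue-guards by a single multiline regex search (^<span.*</pre>$) that picks out the first qualifying line directly.
import Mathlib
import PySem

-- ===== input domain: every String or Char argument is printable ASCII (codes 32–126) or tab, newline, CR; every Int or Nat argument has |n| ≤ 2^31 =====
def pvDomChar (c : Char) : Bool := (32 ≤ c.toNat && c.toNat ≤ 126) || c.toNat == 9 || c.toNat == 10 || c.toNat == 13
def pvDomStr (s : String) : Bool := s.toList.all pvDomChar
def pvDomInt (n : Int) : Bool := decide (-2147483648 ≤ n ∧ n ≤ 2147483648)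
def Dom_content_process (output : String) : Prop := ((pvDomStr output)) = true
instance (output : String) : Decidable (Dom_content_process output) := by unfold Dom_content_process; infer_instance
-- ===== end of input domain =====

-- ===== PORT A =====
-- header: B replaces A's explicit line loop by a single multiline regex search (idiomatic); same return value.
-- loop body of A: 'for line in output.split('\n')' with two 'continue' guards, first hit returns
def contentLoopA : List String → String → String
  | [], output => output
  | line :: rest, output =>
      if !(PySem.Str.startswith line "<span") then contentLoopA rest output
      else if !(PySem.Str.endswith line "</pre>") then contentLoopA rest output
      else PySem.Str.replace line "</pre>" ""

def content_process (output : String) : String :=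
  if !(PySem.Str.startswith output "<?xml") then output
  else contentLoopA (((PySem.Str.split? output "\n").getD [])) output

-- ===== PORT B =====
-- re.search(r'^<span.*</pre>$', output, re.MULTILINE): since '.' never matches '\n' and the
-- MULTILINE anchors '^'/'$' bind exactly to the '\n' boundaries, the leftmost match is exactly
-- the first '\n'-separated line that starts with '<span' and ends with '</pre>', and m.group()
-- is that whole line; ported exactly as that first-matching-line search.
def content_process_alt (output : String) : String :=
  if !(PySem.Str.startswith output "<?xml") then output
  else
    match (((PySem.Str.split? output "\n").getD [])).find?
        (fun l => PySem.Str.startswith l "<span" && PySem.Str.endswith l "</pre>") with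
    | none => output
    | some l => PySem.Str.replace l "</pre>" ""

-- ===== PRECONDITION & SPEC =====
def Spec_content_process (output : String) (out : String) : Prop := out = content_process_alt output
instance (output : String) (out : String) : Decidable (Spec_content_process output out) := by unfold Spec_content_process; infer_instance

-- ===== CLAIM (what is proved, stated in full; the proofs are below) =====
def Claim_equal_content_process : Prop := ∀ (output : String), Dom_content_process output → Spec_content_process output (content_process output)

-- ===== LEMMAS AND PROOFS =====

theorem contentLoopA_eq_find (ls : List String) (output : String) :
    contentLoopA ls output =
      match ls.find?
          (fun l => PySem.Str.startswith l "<span" && PySem.Str.endswith l "</pre>") with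
      | none => output
      | some l => PySem.Str.replace l "</pre>" "" := by
  induction ls with
  | nil => rfl
  | cons line rest ih =>
      simp only [contentLoopA, List.find?, PySem.Str.startswith_eq, PySem.Str.endswith_eq] at ih ⊢
      by_cases h1 : PySem.Chars.startswith line.toList ['<', 's', 'p', 'a', 'n']
      · by_cases h2 : PySem.Chars.endswith line.toList ['<', '/', 'p', 'r', 'e', '>']
        · simp [h1, h2]
        · simpa [h1, h2] using ih
      · simpa [h1] using ih

-- ===== VERDICT (by name: the statement is the Claim_ definition above) =====
theorem content_process_spec : Claim_equal_content_process := by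
  intro output _
  unfold Spec_content_process content_process content_process_alt
  rw [contentLoopA_eq_find]
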